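-- pv_equiv track=rewrite | github.com/InnovAIte-Deakin/aaie-model-lab | Model and Prompt Selection/Model Pipeline/utlis/prompt.py | create_few_shot_block
-- ===== SOURCE A (Python) =====
-- from typing import List, Dict, Any
--
-- def create_few_shot_block(subs: List[Dict[str, Any]], max_examples: int = 3) -> str:
--     """
--     Select a few representative examples and return a formatted text block for few-shot prompting.
--     """
--     labels = ["Human", "AI", "Hybrid"]
--     shots = []
--
--     # Pick one example per label first
--     for label in labels:
--         for s in subs:
--             if s.get("label_type", "").strip() == label:
--                 shots.append(s)
--                 break
--
--     # Fill remaining slots if needed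
--     for s in subs:
--         if len(shots) >= max_examples:
--             break
--         if s not in shots:
--             shots.append(s)
--
--     # Create the formatted few-shot block
--     if shots:
--         return "\n\n".join(
--             f'Submission: """{s.get("final_submission", "")}"""\nLabel: {s.get("label_type", "Unknown")}'
--             for s in shots
--         )
--
--     return "/* no examples available */"
-- ===== SOURCE B (Python) =====
-- def create_few_shot_block(subs, max_examples=3):
--     labels = ["Human", "AI", "Hybrid"]
--
--     # One pass over subs: record only the first submission per known label,
--     # and stop early once every label has been seen.
--     first_by_label = {}
--     for s in subs:
--         lt = s.get("label_type", "").strip()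
--         if lt in labels and lt not in first_by_label:
--             first_by_label[lt] = s
--             if len(first_by_label) == len(labels):
--                 break
--     shots = [first_by_label[l] for l in labels if l in first_by_label]
--
--     # Fill remaining slots if needed
--     for s in subs:
--         if len(shots) >= max_examples:
--             break
--         if s not in shots:
--             shots.append(s)
--
--     if not shots:
--         return "/* no examples available */"
--     return "\n\n".join(
--         f'Submission: """{s.get("final_submission", "")}"""\nLabel: {s.get("label_type", "Unknown")}'
--         for s in shots
--     )
-- ===== Notes on version B (the rewrite author's own statement) =====
-- stated objective: alternative
-- what changed: Replaces A's per-label rescans of subs with a single pass that builds a dict of the first submission per label (breaking once all three labels are found) and then reads shots off the dict in label order; the fill loop and formatting are unchanged.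
import Mathlib
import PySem

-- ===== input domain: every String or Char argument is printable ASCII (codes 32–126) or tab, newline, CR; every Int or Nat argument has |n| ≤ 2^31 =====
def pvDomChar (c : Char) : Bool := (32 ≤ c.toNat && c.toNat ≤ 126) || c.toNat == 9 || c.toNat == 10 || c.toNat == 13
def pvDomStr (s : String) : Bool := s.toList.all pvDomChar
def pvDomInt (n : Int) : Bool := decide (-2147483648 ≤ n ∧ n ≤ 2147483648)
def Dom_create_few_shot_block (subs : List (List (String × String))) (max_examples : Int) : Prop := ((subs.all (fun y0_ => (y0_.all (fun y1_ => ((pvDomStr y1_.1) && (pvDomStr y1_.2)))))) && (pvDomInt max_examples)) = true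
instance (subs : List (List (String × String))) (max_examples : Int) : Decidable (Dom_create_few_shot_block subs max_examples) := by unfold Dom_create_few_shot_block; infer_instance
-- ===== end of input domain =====

-- B replaces A's three per-label rescans of subs by one early-terminating pass that
-- records the first submission per label in a dict (objective: alternative decomposition).

-- shared Python-semantics helpers (s.get(k, dflt), s.get("label_type","").strip(),
-- Python dict == (order-insensitive mapping equality), the f-string line)
def pvGetD (s : List (String × String)) (k dflt : String) : String :=
  (PySem.Dict.mk s).getD k dflt

def pvLabel (s : List (String × String)) : String :=
  PySem.Str.strip (pvGetD s "label_type" "")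

def pyDictEq (d e : List (String × String)) : Bool :=
  PySem.Set.equal (PySem.Set.ofList (d.map Prod.fst)) (PySem.Set.ofList (e.map Prod.fst)) &&
  (d.map Prod.fst).all (fun k => (PySem.Dict.mk d).get? k == (PySem.Dict.mk e).get? k)

def pvFmt (s : List (String × String)) : String :=
  "Submission: \"\"\"" ++ pvGetD s "final_submission" "" ++ "\"\"\"\nLabel: " ++
    pvGetD s "label_type" "Unknown"

-- ===== PORT A =====
-- A's second loop: break when len(shots) >= max_examples, append when s not in shots
def pvFillA (maxE : Int) (shots : List (List (String × String))) :
    List (List (String × String)) → List (List (String × String))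
  | [] => shots
  | s :: t =>
    if maxE ≤ (shots.length : Int) then shots
    else if shots.any (fun x => pyDictEq s x) then pvFillA maxE shots t
    else pvFillA maxE (shots ++ [s]) t

def create_few_shot_block (subs : List (List (String × String))) (max_examples : Int) : String :=
  let labels : List String := ["Human", "AI", "Hybrid"]
  -- for label in labels: for s in subs: if match: append; break
  let shots := labels.foldl (fun acc label =>
      match subs.find? (fun s => pvLabel s == label) with
      | some s => acc ++ [s]
      | none => acc) []
  let shots := pvFillA max_examples shots subs
  if shots ≠ [] then PySem.Str.join "\n\n" (shots.map pvFmt)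
  else "/* no examples available */"

-- ===== PORT B =====
-- B's single pass: record first submission per known label, break when all labels found
def pvBuildB (labels : List String) :
    List (List (String × String)) → PySem.Dict String (List (String × String)) →
      PySem.Dict String (List (String × String))
  | [], d => d
  | s :: t, d =>
    let lt := pvLabel s
    if labels.contains lt && !(d.contains lt) then
      let d' := d.insert lt s
      if d'.size == labels.length then d' else pvBuildB labels t d'
    else pvBuildB labels t d

-- B's fill loop (same Python code as A's second loop)
def pvFillB (maxE : Int) (shots : List (List (String × String))) :
    List (List (String × String)) → List (List (String × String))
  | [] => shots
  | s :: t =>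
    if maxE ≤ (shots.length : Int) then shots
    else if shots.any (fun x => pyDictEq s x) then pvFillB maxE shots t
    else pvFillB maxE (shots ++ [s]) t

def create_few_shot_block_alt (subs : List (List (String × String))) (max_examples : Int) : String :=
  let labels : List String := ["Human", "AI", "Hybrid"]
  let fbl := pvBuildB labels subs PySem.Dict.empty
  let shots := labels.filterMap (fun l => fbl.get? l)
  let shots := pvFillB max_examples shots subs
  if shots = [] then "/* no examples available */"
  else PySem.Str.join "\n\n" (shots.map pvFmt)

-- ===== PRECONDITION & SPEC =====
def Spec_create_few_shot_block (subs : List (List (String × String))) (max_examples : Int) (out : String) : Prop := out = create_few_shot_block_alt subs max_examples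
instance (subs : List (List (String × String))) (max_examples : Int) (out : String) : Decidable (Spec_create_few_shot_block subs max_examples out) := by unfold Spec_create_few_shot_block; infer_instance

-- ===== CLAIM (what is proved, stated in full; the proofs are below) =====
def Claim_equal_create_few_shot_block : Prop := ∀ (subs : List (List (String × String))) (max_examples : Int), Dom_create_few_shot_block subs max_examples → Spec_create_few_shot_block subs max_examples (create_few_shot_block subs max_examples)

-- ===== LEMMAS AND PROOFS =====

-- A's per-label selection fold is the filterMap of first matches
theorem fold_find_eq_filterMap (subs : List (List (String × String)))
    (L : List String) (acc : List (List (String × String))) :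
    L.foldl (fun acc label =>
      match subs.find? (fun s => pvLabel s == label) with
      | some s => acc ++ [s]
      | none => acc) acc
    = acc ++ L.filterMap (fun l => subs.find? (fun s => pvLabel s == l)) := by
  induction L generalizing acc with
  | nil => simp
  | cons l t ih =>
    simp only [List.foldl_cons, List.filterMap_cons]
    cases h : subs.find? (fun s => pvLabel s == l) with
    | none => simpa using ih acc
    | some s => simp only []; rw [ih (acc ++ [s])]; simp

-- B's building pass computes, for each label, the first matching submission
-- a nodup subset of a list with the list's full length contains every element of it
theorem nodup_subset_length_le (a b : List String) (h : a ⊆ b) (hn : a.Nodup) :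
    a.length ≤ b.length := by
  calc a.length = a.toFinset.card := (List.toFinset_card_of_nodup hn).symm
  _ ≤ b.toFinset.card := Finset.card_le_card (by intro x hx; simp at hx ⊢; exact h hx)
  _ ≤ b.length := b.toFinset_card_le

-- B's building pass computes, for each label, the first matching submission
theorem buildB_get? (labels : List String)
    (rest : List (List (String × String)))
    (d : PySem.Dict String (List (String × String)))
    (hk : d.keys.Nodup) (hsub : ∀ k ∈ d.keys, k ∈ labels)
    (l : String) (hl : l ∈ labels) :
    (pvBuildB labels rest d).get? l
      = (d.get? l).or (rest.find? (fun s => pvLabel s == l)) := by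
  induction rest generalizing d with
  | nil => simp [pvBuildB]
  | cons s t ih =>
    simp only [pvBuildB]
    cases hc : labels.contains (pvLabel s) && !(d.contains (pvLabel s)) with
    | true =>
      rw [if_pos rfl]
      have hmem : pvLabel s ∈ labels := by
        have := (Bool.and_eq_true _ _).mp hc |>.1
        simpa using this
      have hnc : d.contains (pvLabel s) = false := by
        have := (Bool.and_eq_true _ _).mp hc |>.2
        simpa using this
      have hget_none : d.get? (pvLabel s) = none := by
        rw [PySem.Dict.get?_eq_none_iff_contains]; exact hnc
      have hk' : (d.insert (pvLabel s) s).keys.Nodup :=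
        PySem.Dict.nodup_keys_insert d _ _ hk
      have hsub' : ∀ k ∈ (d.insert (pvLabel s) s).keys, k ∈ labels := by
        intro k hkmem
        rcases (PySem.Dict.mem_keys_insert d _ _ _).mp hkmem with h | h
        · exact h ▸ hmem
        · exact hsub k h
      cases hsz : ((d.insert (pvLabel s) s).size == labels.length) with
      | true =>
        rw [if_pos rfl]
        -- every label is a key of d' : keys is a nodup subset of labels of full length
        have hfin : l ∈ (d.insert (pvLabel s) s).keys := by
          have hcard : ((d.insert (pvLabel s) s).keys).length = labels.length := by
            have hsz' : (d.insert (pvLabel s) s).size = labels.length := by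
              simpa using hsz
            simpa [PySem.Dict.keys, PySem.Dict.size] using hsz'
          by_contra hnot
          have hle : ((d.insert (pvLabel s) s).keys).length ≤ (labels.erase l).length :=
            nodup_subset_length_le _ _
              (by intro k hkm
                  exact (List.mem_erase_of_ne
                    (by rintro rfl; exact hnot hkm)).mpr (hsub' k hkm)) hk'
          have : (labels.erase l).length = labels.length - 1 := List.length_erase_of_mem hl
          have hpos : 0 < labels.length := List.length_pos_of_mem hl
          omega
        by_cases hl_eq : l = pvLabel s
        · subst hl_eq
          rw [PySem.Dict.get?_insert_self, hget_none]
          simp [pvLabel]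
        · rw [PySem.Dict.get?_insert_of_ne d s hl_eq]
          have hlk : l ∈ d.keys := by
            rcases (PySem.Dict.mem_keys_insert d _ _ _).mp hfin with h | h
            · exact absurd h hl_eq
            · exact h
          rcases Option.ne_none_iff_exists'.mp
              ((not_iff_not.mpr (PySem.Dict.get?_eq_none_iff_not_mem_keys d l)).mpr
                (by simpa using hlk)) with ⟨v, hv⟩
          simp [hv]
      | false =>
        rw [if_neg (by simp)]
        rw [ih _ hk' hsub']
        by_cases hl_eq : l = pvLabel s
        · subst hl_eq
          rw [PySem.Dict.get?_insert_self, hget_none]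
          simp
        · rw [PySem.Dict.get?_insert_of_ne d s hl_eq]
          have : (pvLabel s == l) = false := by
            simp [beq_eq_false_iff_ne]; exact fun h => hl_eq h.symm
          simp [this]
    | false =>
      rw [if_neg (by simp)]
      rw [ih _ hk hsub]
      by_cases hl_eq : l = pvLabel s
      · subst hl_eq
        -- insertion refused with the label known means d already contains it
        have hcont : d.contains (pvLabel s) = true := by
          rcases Bool.and_eq_false_iff.mp hc with h | h
          · simp [List.contains_eq_mem] at h; exact absurd hl h
          · simpa using h
        have : d.get? (pvLabel s) ≠ none := by
          intro h0
          rw [PySem.Dict.get?_eq_none_iff_contains] at h0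
          simp [hcont] at h0
        rcases Option.ne_none_iff_exists'.mp this with ⟨v, hv⟩
        simp [hv]
      · have : (pvLabel s == l) = false := by
          simp [beq_eq_false_iff_ne]; exact fun h => hl_eq h.symm
        simp [this]

-- the two (textually identical) fill loops agree
theorem fill_eq (maxE : Int) (rest shots : List (List (String × String))) :
    pvFillA maxE shots rest = pvFillB maxE shots rest := by
  induction rest generalizing shots with
  | nil => rfl
  | cons s t ih => simp only [pvFillA, pvFillB, ih]

-- ===== VERDICT (by name: the statement is the Claim_ definition above) =====
theorem create_few_shot_block_spec : Claim_equal_create_few_shot_block := by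
  intro subs max_examples _
  unfold Spec_create_few_shot_block create_few_shot_block create_few_shot_block_alt
  have hshots : (["Human", "AI", "Hybrid"] : List String).foldl (fun acc label =>
        match subs.find? (fun s => pvLabel s == label) with
        | some s => acc ++ [s]
        | none => acc) []
      = (["Human", "AI", "Hybrid"] : List String).filterMap
          (fun l => (pvBuildB ["Human", "AI", "Hybrid"] subs PySem.Dict.empty).get? l) := by
    rw [fold_find_eq_filterMap]
    simp only [List.nil_append]
    refine List.filterMap_congr ?_
    intro l hl
    rw [buildB_get? _ _ _ (by simp [PySem.Dict.keys_empty])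
      (by simp [PySem.Dict.keys_empty]) l hl]
    simp
  simp only [fill_eq, hshots]
  by_cases h : pvFillB max_examples
      ((["Human", "AI", "Hybrid"] : List String).filterMap
        (fun l => (pvBuildB ["Human", "AI", "Hybrid"] subs PySem.Dict.empty).get? l)) subs = []
  · simp [h]
  · simp [h]
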